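-- pv_equiv track=rewrite | github.com/kengiroy2-g/kenobase | scripts/multi_pool_tracker.py | get_streak
-- ===== SOURCE A (Python) =====
-- from typing import Dict, List, Optional, Set, Tuple
--
-- def get_streak(draws: List[Dict], number: int) -> int:
--     """Berechnet Streak."""
--     if not draws:
--         return 0
--     streak = 0
--     in_last = number in draws[-1]["zahlen"]
--     for draw in reversed(draws):
--         if (number in draw["zahlen"]) == in_last:
--             streak += 1
--         else:
--             break
--     return streak if in_last else -streak
-- ===== SOURCE B (Python) =====
-- def get_streak(draws, number):
--     """Berechnet Streak."""
--     if not draws: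
--         return 0
--     flags = [number in draw["zahlen"] for draw in draws]
--     in_last = flags[-1]
--     cut = 0
--     for i, f in enumerate(flags):
--         if f != in_last:
--             cut = i + 1
--     n = len(flags) - cut
--     return n if in_last else -n
-- ===== Notes on version B (the rewrite author's own statement) =====
-- stated objective: alternative
-- what changed: Instead of scanning reversed(draws) with a counter and break, B computes the membership flags in one forward pass, records the index just past the LAST flag that differs from the final one, and returns the signed length of the remaining suffix (len - cut). Pre_ excludes draw lists containing a dict without the key 'zahlen', on which A raises KeyError unless its reverse scan breaks before reaching that dict.
-- outside the precondition, e.g. on get_streak([{'x': []}, {'zahlen': [1]}, {'zahlen': []}], 1): A returns -1, B raises KeyError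
import Mathlib
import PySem

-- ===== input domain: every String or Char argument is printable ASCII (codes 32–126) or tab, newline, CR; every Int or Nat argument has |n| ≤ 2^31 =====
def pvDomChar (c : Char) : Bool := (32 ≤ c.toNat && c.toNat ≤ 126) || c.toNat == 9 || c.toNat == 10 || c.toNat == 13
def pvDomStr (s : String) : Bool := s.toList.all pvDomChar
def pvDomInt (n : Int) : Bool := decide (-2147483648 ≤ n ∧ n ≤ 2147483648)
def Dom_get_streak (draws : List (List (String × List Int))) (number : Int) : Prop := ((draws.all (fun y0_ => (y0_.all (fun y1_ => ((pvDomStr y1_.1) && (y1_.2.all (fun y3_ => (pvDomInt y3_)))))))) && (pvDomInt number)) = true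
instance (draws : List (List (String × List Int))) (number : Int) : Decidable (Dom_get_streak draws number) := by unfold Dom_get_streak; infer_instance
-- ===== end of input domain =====

-- B replaces A's reversed scan with break by a forward pass that records the index past
-- the last flag differing from the final one; alternative decomposition, not claimed faster.

-- ===== PORT A =====
-- number in draw["zahlen"]  (first match of the key; Pre_ guarantees the key is present)
def zahlenMemA (draw : List (String × List Int)) (number : Int) : Bool :=
  ((draw.find? (fun p => p.1 == "zahlen")).map (·.2)).getD [] |>.contains number

-- the 'for draw in reversed(draws): if … streak += 1 else break' loop
def streakLoopA (l : List (List (String × List Int))) (number : Int) (in_last : Bool) : Int :=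
  match l with
  | [] => 0
  | d :: rest =>
    if (zahlenMemA d number == in_last) then 1 + streakLoopA rest number in_last else 0

def get_streak (draws : List (List (String × List Int))) (number : Int) : Int :=
  match draws.reverse with
  | [] => 0             -- 'if not draws: return 0'
  | last :: _ =>
    let in_last := zahlenMemA last number       -- number in draws[-1]["zahlen"]
    let streak := streakLoopA draws.reverse number in_last
    if in_last then streak else -streak

-- ===== PORT B =====
def zahlenMemB (draw : List (String × List Int)) (number : Int) : Bool :=
  match draw.find? (fun p => p.1 == "zahlen") with
  | some p => p.2.contains number
  | none => false

def get_streak_alt (draws : List (List (String × List Int))) (number : Int) : Int :=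
  if draws.isEmpty then 0
  else
    let flags := draws.map (fun d => zahlenMemB d number)
    let in_last := flags.getLastD false          -- flags[-1]
    let cut := (PySem.List.enumerate flags).foldl
      (fun cut p => if p.2 != in_last then p.1 + 1 else cut) 0
    let n : Int := (flags.length : Int) - cut
    if in_last then n else -n

-- ===== PRECONDITION & SPEC =====
-- Pre_ excludes draw lists containing a dict without the key "zahlen": there Python A raises
-- KeyError unless its reverse scan happens to break before reaching that dict (B raises there).
def Pre_get_streak (draws : List (List (String × List Int))) (number : Int) : Prop :=
  ∀ d ∈ draws, (d.find? (fun p => p.1 == "zahlen")).isSome = true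
instance (draws : List (List (String × List Int))) (number : Int) : Decidable (Pre_get_streak draws number) := by unfold Pre_get_streak; infer_instance

def pvWitness_get_streak : (List (List (String × List Int))) × Int :=
  ([[("zahlen", [1, 2])], [("zahlen", [3])]], 3)

def Spec_get_streak (draws : List (List (String × List Int))) (number : Int) (out : Int) : Prop := out = get_streak_alt draws number
instance (draws : List (List (String × List Int))) (number : Int) (out : Int) : Decidable (Spec_get_streak draws number out) := by unfold Spec_get_streak; infer_instance

-- ===== CLAIM (what is proved, stated in full; the proofs are below) =====
def Claim_equal_get_streak : Prop := ∀ (draws : List (List (String × List Int))) (number : Int), Dom_get_streak draws number → Pre_get_streak draws number → Spec_get_streak draws number (get_streak draws number)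

-- ===== LEMMAS AND PROOFS =====

-- B's cut loop, abstracted to a flag list
def cutB (flags : List Bool) (b : Bool) : Int :=
  (PySem.List.enumerate flags).foldl (fun cut p => if p.2 != b then p.1 + 1 else cut) 0

theorem mem_eq (d : List (String × List Int)) (n : Int) : zahlenMemA d n = zahlenMemB d n := by
  unfold zahlenMemA zahlenMemB
  cases h : d.find? (fun p => p.1 == "zahlen") <;> simp

theorem cutB_append (flags : List Bool) (x b : Bool) :
    cutB (flags ++ [x]) b = if x != b then (flags.length : Int) + 1 else cutB flags b := by
  unfold cutB
  rw [PySem.List.enumerate_append]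
  simp [List.foldl_append, PySem.List.enumerate]

theorem cutB_eq (flags : List Bool) (b : Bool) :
    cutB flags b = (flags.length : Int) - ((flags.reverse.takeWhile (· == b)).length : Int) := by
  induction flags using List.reverseRecOn with
  | nil => simp [cutB, PySem.List.enumerate]
  | append_singleton ys x ih =>
    rw [cutB_append]
    by_cases hx : x = b
    · subst hx
      simp only [bne_self_eq_false, ih, List.reverse_append, List.reverse_cons,
        List.reverse_nil, List.nil_append, List.cons_append, List.takeWhile]
      simp
    · have hb : (x != b) = true := by simp [bne, hx]
      simp only [hb, if_true, List.reverse_append, List.reverse_cons, List.reverse_nil,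
        List.nil_append, List.cons_append, List.takeWhile]
      have : (x == b) = false := by simp [hx]
      simp [this]

theorem streakLoopA_eq (l : List (List (String × List Int))) (number : Int) (b : Bool) :
    streakLoopA l number b
      = (((l.map (fun d => zahlenMemA d number)).takeWhile (· == b)).length : Int) := by
  induction l with
  | nil => simp [streakLoopA]
  | cons d rest ih =>
    simp only [streakLoopA, List.map_cons, List.takeWhile]
    by_cases h : zahlenMemA d number = b
    · simp [h, ih]; omega
    · have : (zahlenMemA d number == b) = false := by simp [h]
      simp [this]

-- ===== VERDICT (by name: the statement is the Claim_ definition above) =====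
theorem map_memA_eq_memB (l : List (List (String × List Int))) (n : Int) :
    l.map (fun d => zahlenMemA d n) = l.map (fun d => zahlenMemB d n) := by
  simp [mem_eq]

theorem get_streak_spec : Claim_equal_get_streak := by
  intro draws number _ _
  unfold Spec_get_streak get_streak get_streak_alt
  cases hrev : draws.reverse with
  | nil =>
    have : draws = [] := by simpa using congrArg List.reverse hrev
    subst this; simp
  | cons last rest =>
    have hne : draws ≠ [] := by
      intro h; subst h; simp at hrev
    have hempty : draws.isEmpty = false := by simp [hne]
    simp only [hempty, Bool.false_eq_true, if_false]
    -- identify in_last on both sides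
    have hlastd : (draws.map (fun d => zahlenMemB d number)).getLastD false
        = zahlenMemB last number := by
      have : (draws.map (fun d => zahlenMemB d number)).reverse
          = zahlenMemB last number :: rest.map (fun d => zahlenMemB d number) := by
        rw [← List.map_reverse, hrev, List.map_cons]
      rw [List.getLastD_eq_getLast?, ← List.head?_reverse, this]
      rfl
    have hmemAB := mem_eq last number
    -- streak characterisation
    have hstreak := streakLoopA_eq (last :: rest) number (zahlenMemA last number)
    have hcut := cutB_eq (draws.map (fun d => zahlenMemB d number)) (zahlenMemB last number)
    have hsame : ((last :: rest).map (fun d => zahlenMemA d number))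
        = (draws.map (fun d => zahlenMemB d number)).reverse := by
      rw [← hrev, map_memA_eq_memB, List.map_reverse]
    rw [hsame] at hstreak
    rw [hlastd]
    show (if zahlenMemA last number then
        streakLoopA (last :: rest) number (zahlenMemA last number)
      else -streakLoopA (last :: rest) number (zahlenMemA last number)) = _
    rw [hstreak, hmemAB]
    show _ = (if zahlenMemB last number then
        ((draws.map (fun d => zahlenMemB d number)).length : Int)
          - cutB (draws.map (fun d => zahlenMemB d number)) (zahlenMemB last number)
      else -(((draws.map (fun d => zahlenMemB d number)).length : Int)
          - cutB (draws.map (fun d => zahlenMemB d number)) (zahlenMemB last number)))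
    rw [hcut]
    ring_nf
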